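-- pv_equiv track=rewrite | github.com/csh-lovenico/my-leetcode | 1001_/1444_number_of_ways_of_cutting_a_pizza.py | ways
-- ===== SOURCE A (Python) =====
-- from functools import lru_cache
-- from typing import List
--
-- def ways(pizza: List[str], k: int) -> int:
--     M = 10 ** 9 + 7
--     m, n = len(pizza), len(pizza[0])
--
--     arr = [[0] * n for _ in range(m)]
--     # keep track of total apples from left top corner to right down corner
--     for i in range(m):
--         for j in range(n):
--             arr[i][j] = ''.join(x[j:] for x in pizza[i:]).count('A')
--
--     @lru_cache(None)
--     def dp(r, c, k, cnt):
--         # base case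
--         if k == 1:
--             return 1
--         ans = 0
--         for i in range(m):
--             # cuts must be either right or down
--             if i <= r:
--                 continue
--             # rest apples should have at least one but less than previous sum
--             if 0 < arr[i][c] < cnt:
--                 ans += dp(i, c, k - 1, arr[i][c])
--         for j in range(n):
--             if j <= c:
--                 continue
--             if 0 < arr[r][j] < cnt:
--                 ans += dp(r, j, k - 1, arr[r][j])
--         return ans % M
--
--     return dp(0, 0, k, arr[0][0])
-- ===== SOURCE B (Python) =====
-- def ways(pizza, k):
--     M = 10 ** 9 + 7
--     m, n = len(pizza), len(pizza[0])
--
--     # apples[i][j] = number of 'A's at (row >= i, col >= j), by suffix sums: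
--     # one right-to-left pass per row, then one pass down the rows.  O(m*n).
--     rev = [[0] * n]
--     for row in reversed(pizza):
--         below = rev[-1]
--         suf = [0] * (len(row) + 1)
--         for j in range(len(row) - 1, -1, -1):
--             suf[j] = suf[j + 1] + (1 if row[j] == 'A' else 0)
--         rev.append([below[j] + (suf[j] if j < len(row) else 0) for j in range(n)])
--     apples = list(reversed(rev))
--
--     total = apples[0][0]
--     if k < 1 or k > total:
--         return 0
--
--     # f[r][c] = ways to cut the pizza piece (rows >= r, cols >= c) into t pieces,
--     # each containing an apple; bottom-up over t = 1 .. k.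
--     f = [[1 if x > 0 else 0 for x in r] for r in apples[:m]]
--     for _ in range(k - 1):
--         f = [[(sum(f[i][c] for i in range(r + 1, m) if apples[i][c] < apples[r][c])
--                + sum(f[r][j] for j in range(c + 1, n) if apples[r][j] < apples[r][c])) % M
--               for c in range(n)]
--              for r in range(m)]
--     return f[0][0]
-- ===== Notes on version B (the rewrite author's own statement) =====
-- stated objective: faster
-- what changed: B builds the apple-count table with O(mn) suffix prefix sums instead of A's per-cell string join+count (O((mn)^2) work), and computes the cut counts bottom-up layer by layer instead of A's memoized top-down recursion; B also returns 0 immediately when k < 1 or k exceeds the total apple count.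
-- intended difference: When k = 1 and the pizza contains no 'A', A returns 1 (its base case ignores the apple count) while B returns 0, the intended answer since every piece must contain an apple. — e.g. on ways(["."], 1): A returns 1, B returns 0
-- outside the precondition, e.g. on ways([], 1): A raises IndexError, B raises IndexError; on ways(['', 'A'], 1): A raises IndexError, B raises IndexError
import Mathlib
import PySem

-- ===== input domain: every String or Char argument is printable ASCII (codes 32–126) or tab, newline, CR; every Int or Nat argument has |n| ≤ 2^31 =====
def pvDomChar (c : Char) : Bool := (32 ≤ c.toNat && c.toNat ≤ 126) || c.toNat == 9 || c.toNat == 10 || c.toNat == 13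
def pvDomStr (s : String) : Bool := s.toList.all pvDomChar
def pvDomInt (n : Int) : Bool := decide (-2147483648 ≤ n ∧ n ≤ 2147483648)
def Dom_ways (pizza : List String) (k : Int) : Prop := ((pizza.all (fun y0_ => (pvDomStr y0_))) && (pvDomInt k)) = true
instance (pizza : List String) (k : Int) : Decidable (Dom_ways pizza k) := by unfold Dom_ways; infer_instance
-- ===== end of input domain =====

-- B replaces A's per-cell join-and-count apple table (O((mn)^2) work) by a suffix prefix-sum
-- table and A's memoized top-down recursion by a bottom-up layered table: objective faster.

-- ===== PORT A =====
-- arr[i][j] = ''.join(x[j:] for x in pizza[i:]).count('A')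
def waysArrCell (pizza : List String) (i j : Int) : Int :=
  (PySem.Str.count
    (PySem.Str.join "" ((PySem.List.slice pizza (some i) none).map
      (fun x => PySem.Str.slice x (some j) none))) "A" : Int)

def waysArr (pizza : List String) (m n : Int) : List (List Int) :=
  (PySem.List.pyRange 0 m).map (fun i =>
    (PySem.List.pyRange 0 n).map (fun j => waysArrCell pizza i j))

def arrGet (arr : List (List Int)) (i j : Int) : Int :=
  PySem.List.pyGetD (PySem.List.pyGetD arr i []) j 0

def waysDp (arr : List (List Int)) (m n : Int) :
    Nat → Int → Int → Int → Int → Int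
  | 0, _, _, _, _ => 0
  | fuel+1, r, c, k, cnt =>
    if k = 1 then 1
    else
      PySem.Int.mod
        ((PySem.List.pyRange 0 n).foldl (fun ans j =>
          if j ≤ c then ans
          else if 0 < arrGet arr r j ∧ arrGet arr r j < cnt then
            ans + waysDp arr m n fuel r j (k-1) (arrGet arr r j)
          else ans)
         ((PySem.List.pyRange 0 m).foldl (fun ans i =>
          if i ≤ r then ans
          else if 0 < arrGet arr i c ∧ arrGet arr i c < cnt then
            ans + waysDp arr m n fuel i c (k-1) (arrGet arr i c)
          else ans) 0))
        1000000007

def ways (pizza : List String) (k : Int) : Int :=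
  let m : Int := pizza.length
  let n : Int := PySem.Str.len (PySem.List.pyGetD pizza 0 "")
  let arr := waysArr pizza m n
  let cnt0 := arrGet arr 0 0
  waysDp arr m n (cnt0.toNat + 1) 0 0 k cnt0

-- ===== PORT B =====
-- suf[j] = number of 'A' in row[j:], one right-to-left pass (Source B's suf, minus its trailing 0)
def altSuf : List Char → List Int
  | [] => []
  | ch :: rest =>
    let t := altSuf rest
    ((if ch = 'A' then (1:Int) else 0) + t.headD 0) :: t

def altRow (below : List Int) (row : List Char) (n : Nat) : List Int :=
  (List.range n).map (fun j =>
    below.getD j 0 + if j < row.length then (altSuf row).getD j 0 else 0)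

def altRev (pizza : List String) (n : Nat) : List (List Int) :=
  pizza.reverse.foldl
    (fun rev row => rev ++ [altRow (rev.getLastD []) row.toList n])
    [List.replicate n 0]

def altGet (g : List (List Int)) (i j : Int) : Int :=
  PySem.List.pyGetD (PySem.List.pyGetD g i []) j 0

def altStep (ap : List (List Int)) (m n : Int) (f : List (List Int)) : List (List Int) :=
  (PySem.List.pyRange 0 m).map (fun r =>
    (PySem.List.pyRange 0 n).map (fun c =>
      PySem.Int.mod
        (((PySem.List.pyRange (r+1) m).foldl (fun s i =>
            if altGet ap i c < altGet ap r c then s + altGet f i c else s) 0)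
         + ((PySem.List.pyRange (c+1) n).foldl (fun s j =>
            if altGet ap r j < altGet ap r c then s + altGet f r j else s) 0))
        1000000007))

def ways_alt (pizza : List String) (k : Int) : Int :=
  let m : Int := pizza.length
  let n : Int := PySem.Str.len (PySem.List.pyGetD pizza 0 "")
  let ap := (altRev pizza n.toNat).reverse
  let total := altGet ap 0 0
  if k < 1 ∨ total < k then 0
  else
    let f0 := (PySem.List.slice ap none (some m)).map
      (fun row => row.map (fun x => if 0 < x then (1:Int) else 0))
    let f := (PySem.List.pyRange 0 (k-1)).foldl (fun f _ => altStep ap m n f) f0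
    altGet f 0 0

-- ===== PRECONDITION & SPEC =====
-- Pre_ excludes exactly the inputs on which A raises IndexError: an empty pizza
-- (pizza[0]) and a pizza whose first row is empty (arr[0][0] on a 0-wide table).
def Pre_ways (pizza : List String) (k : Int) : Prop :=
  pizza ≠ [] ∧ (pizza.headD "").toList ≠ []
instance (pizza : List String) (k : Int) : Decidable (Pre_ways pizza k) := by
  unfold Pre_ways; infer_instance

def pvWitness_ways : List String × Int := (["A."], 1)

-- When k = 1 and the pizza has no apple, A returns 1 (its base case ignores the apple
-- count), while B returns the intended 0: a single piece with no apple is not a valid way.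
def D_ways (pizza : List String) (k : Int) : Prop :=
  k = 1 ∧ ∀ s ∈ pizza, 'A' ∉ s.toList
instance (pizza : List String) (k : Int) : Decidable (D_ways pizza k) := by
  unfold D_ways; infer_instance

def Spec_ways (pizza : List String) (k : Int) (out : Int) : Prop :=
  ¬ D_ways pizza k → out = ways_alt pizza k
instance (pizza : List String) (k : Int) (out : Int) : Decidable (Spec_ways pizza k out) := by
  unfold Spec_ways; infer_instance

def pvDiffWitness_ways : List String × Int := (["."], 1)
def pvDiffWitnessOut_ways : Int × Int := (1, 0)

-- ===== CLAIM (what is proved, stated in full; the proofs are below) =====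
def Claim_unchanged_ways : Prop := ∀ (pizza : List String) (k : Int),
  Dom_ways pizza k → Pre_ways pizza k → Spec_ways pizza k (ways pizza k)
def Claim_changed_ways : Prop :=
  Dom_ways (pvDiffWitness_ways.1) (pvDiffWitness_ways.2) ∧
  Pre_ways (pvDiffWitness_ways.1) (pvDiffWitness_ways.2) ∧
  D_ways (pvDiffWitness_ways.1) (pvDiffWitness_ways.2) ∧
  ways (pvDiffWitness_ways.1) (pvDiffWitness_ways.2) = pvDiffWitnessOut_ways.1 ∧
  ways_alt (pvDiffWitness_ways.1) (pvDiffWitness_ways.2) = pvDiffWitnessOut_ways.2 ∧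
  pvDiffWitnessOut_ways.1 ≠ pvDiffWitnessOut_ways.2
def Claim_exact_ways : Prop := ∀ (pizza : List String) (k : Int),
  Dom_ways pizza k → Pre_ways pizza k → D_ways pizza k → ways pizza k ≠ ways_alt pizza k

-- ===== LEMMAS AND PROOFS =====
theorem countGo_A (l : List Char) (fuel acc : Nat) (h : l.length ≤ fuel) :
    PySem.Chars.count.go ['A'] fuel l acc = acc + l.count 'A' := by
  induction l generalizing fuel acc with
  | nil => cases fuel <;> simp [PySem.Chars.count.go]
  | cons ch t ih =>
    cases fuel with
    | zero => simp at h
    | succ fuel =>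
      simp only [PySem.Chars.count.go]
      by_cases hA : ch = 'A'
      · subst hA
        simp only [List.isPrefixOf, List.isPrefixOf_cons₂]
        simp only [List.length_cons, Nat.succ_le_succ_iff] at h
        simp [ih fuel (acc+1) h, List.count_cons]
        omega
      · have hp : ¬ (List.isPrefixOf ['A'] (ch :: t) = true) := by
          simp [List.isPrefixOf, hA, Ne.symm hA]
        simp only [List.length_cons, Nat.succ_le_succ_iff] at h
        simp [hp, ih fuel acc h, List.count_cons, hA, Ne.symm hA]

theorem count_A (s : List Char) : PySem.Chars.count s ['A'] = s.count 'A' := by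
  rw [PySem.Chars.count]
  simp [countGo_A s s.length 0 le_rfl]

theorem join_nil_flatten (parts : List (List Char)) :
    PySem.Chars.join [] parts = parts.flatten := by
  rw [PySem.Chars.join]
  induction parts with
  | nil => rfl
  | cons p ps ih =>
    cases ps with
    | nil => simp [List.intercalate]
    | cons q qs =>
      simp only [List.intercalate, List.intersperse] at *
      simp_all [List.flatten]

def apN (pizza : List String) (i j : Nat) : Nat :=
  ((pizza.drop i).map (fun s => (s.toList.drop j).count 'A')).sum

theorem waysArrCell_eq (pizza : List String) (i j : Nat) :
    waysArrCell pizza (i : Int) (j : Int) = (apN pizza i j : Int) := by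
  rw [waysArrCell, PySem.Str.count_eq, PySem.Str.toList_join]
  have h1 : ("A" : String).toList = ['A'] := rfl
  rw [h1, count_A]
  have h2 : ("" : String).toList = [] := rfl
  rw [h2, join_nil_flatten, List.count_flatten]
  rw [PySem.List.slice_from pizza (by positivity)]
  simp only [List.map_map, Function.comp]
  have h3 : ∀ s : String, (PySem.Str.slice s (some (j:Int)) none).toList
      = s.toList.drop j := by
    intro s
    rw [PySem.Str.toList_slice]
    simp [PySem.Chars.slice_eq_listSlice, PySem.List.slice_from _ (by positivity : (0:Int) ≤ (j:Int))]
  have h4 : (Nat.cast ∘ List.count 'A' ∘ String.toList ∘ fun x => PySem.Str.slice x (some (j:Int)) none)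
      = fun s : String => ((List.count 'A' (List.drop j s.toList) : Nat) : Int) := by
    funext s; simp [Function.comp, h3]
  simp only [apN, Int.toNat_natCast, List.map_map, h4]
  push_cast
  congr 2
  exact List.map_congr_left (fun s _ => by simp [Function.comp, h3])

theorem arrGet_eq (pizza : List String) (m n : Int) (i j : Nat)
    (hi : (i : Int) < m) (hj : (j : Int) < n) :
    arrGet (waysArr pizza m n) (i : Int) (j : Int) = (apN pizza i j : Int) := by
  rw [arrGet, waysArr,
    PySem.List.pyGetD_map_pyRange_of_nonneg _ m _ _ (by positivity) hi,
    PySem.List.pyGetD_map_pyRange_of_nonneg _ n _ _ (by positivity) hj,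
    waysArrCell_eq]

theorem altSuf_headD (row : List Char) :
    (altSuf row).headD 0 = (row.count 'A' : Int) := by
  induction row with
  | nil => simp [altSuf]
  | cons ch rest ih =>
    simp only [altSuf, List.headD_cons, List.count_cons, ih]
    push_cast
    split <;> rename_i h <;> first | (simp [beq_iff_eq, h]; ring) | (simp [beq_iff_eq, h, Ne.symm h])

theorem altSuf_eq (row : List Char) (j : Nat) :
    (if j < row.length then (altSuf row).getD j 0 else 0)
      = ((row.drop j).count 'A' : Int) := by
  induction row generalizing j with
  | nil => simp
  | cons ch rest ih =>
    cases j with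
    | zero =>
      simp only [List.length_cons, Nat.zero_lt_succ, if_pos, altSuf, List.getD_cons_zero,
        List.drop_zero, List.count_cons, altSuf_headD]
      push_cast
      split <;> rename_i h <;> first | (simp [beq_iff_eq, h]; ring) | (simp [beq_iff_eq, h, Ne.symm h])
    | succ j =>
      have := ih j
      simp only [altSuf, List.length_cons, Nat.succ_lt_succ_iff, List.getD_cons_succ,
        List.drop_succ_cons]
      split
      · rw [if_pos (by omega)] at this; exact this
      · rw [if_neg (by omega)] at this; exact this

def applesOf (n : Nat) : List String → List (List Int)
  | [] => [List.replicate n 0]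
  | row :: rest => altRow ((applesOf n rest).headD []) row.toList n :: applesOf n rest

theorem altRev_reverse (pizza : List String) (n : Nat) :
    (altRev pizza n).reverse = applesOf n pizza := by
  induction pizza with
  | nil => rfl
  | cons row rest ih =>
    have hstep : altRev (row :: rest) n
        = altRev rest n ++ [altRow ((altRev rest n).getLastD []) row.toList n] := by
      rw [altRev, altRev, List.reverse_cons, List.foldl_append, List.foldl_cons, List.foldl_nil]
    rw [hstep, List.reverse_append]
    have hlast : (altRev rest n).getLast?.getD [] = (applesOf n rest).head?.getD [] := by
      rw [List.getLast?_eq_head?_reverse, ih]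
    simp [applesOf, hlast, ih, List.getLastD_eq_getLast?, List.headD_eq_head?]

theorem applesOf_entry (n : Nat) (pizza : List String) (i j : Nat)
    (hi : i ≤ pizza.length) (hj : j < n) :
    ((applesOf n pizza).getD i []).getD j 0 = (apN pizza i j : Int) := by
  induction pizza generalizing i with
  | nil =>
    have : i = 0 := by simpa using hi
    subst this
    simp [applesOf, apN, List.getD_eq_getElem?_getD, hj]
  | cons row rest ih =>
    cases i with
    | zero =>
      have hne : applesOf n rest ≠ [] := by cases rest <;> simp [applesOf]
      have hbelow : ((applesOf n rest).headD []).getD j 0 = (apN rest 0 j : Int) := by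
        have h0 := ih 0 (Nat.zero_le _)
        cases h : applesOf n rest with
        | nil => exact absurd h hne
        | cons a t => rw [h] at h0; simpa using h0
      simp only [applesOf, List.getD_cons_zero, altRow,
        PySem.List.getD_map_range _ n j _ hj, hbelow, altSuf_eq]
      have : apN (row :: rest) 0 j = (row.toList.drop j).count 'A' + apN rest 0 j := by
        simp [apN]
      rw [this]; push_cast; ring
    | succ i =>
      simp only [applesOf, List.getD_cons_succ]
      rw [ih i (by simpa using hi)]
      rfl

theorem mod0 : PySem.Int.mod 0 1000000007 = 0 := by decide

theorem altGet_applesOf (n : Nat) (pizza : List String) (i j : Nat)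
    (hi : i ≤ pizza.length) (hj : j < n) :
    altGet (applesOf n pizza) (i : Int) (j : Int) = (apN pizza i j : Int) := by
  rw [altGet, PySem.List.pyGetD_natCast, PySem.List.pyGetD_natCast]
  exact applesOf_entry n pizza i j hi hj

-- the first dp layer of B

def altF0 (pizza : List String) (n : Nat) : List (List Int) :=
  (PySem.List.slice (applesOf n pizza) none (some (pizza.length : Int))).map
    (fun row => row.map (fun x => if 0 < x then (1:Int) else 0))

theorem altGet_f0 (pizza : List String) (n : Nat) (r c : Nat)
    (hr : r < pizza.length) (hc : c < n) :
    altGet (altF0 pizza n) (r : Int) (c : Int)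
      = if 0 < apN pizza r c then 1 else 0 := by
  rw [altF0, PySem.List.slice_to _ (by positivity), Int.toNat_natCast, altGet]
  rw [show ([] : List Int) = List.map (fun x : Int => if 0 < x then (1:Int) else 0) [] from rfl,
    PySem.List.pyGetD_map]
  have h2 := PySem.List.pyGetD_map (fun x : Int => if 0 < x then (1:Int) else 0)
    (PySem.List.pyGetD (List.take pizza.length (applesOf n pizza)) (r : Int) []) (c : Int) 0
  rw [show (if (0:Int) < 0 then (1:Int) else 0) = (0:Int) from by norm_num] at h2
  rw [h2, PySem.List.pyGetD_natCast, PySem.List.pyGetD_natCast]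
  have ht : (List.take pizza.length (applesOf n pizza)).getD r []
      = (applesOf n pizza).getD r [] := by
    simp [List.getD_eq_getElem?_getD, hr]
  rw [ht, applesOf_entry n pizza r c (by omega) hc]
  by_cases h : 0 < apN pizza r c
  · rw [if_pos (by exact_mod_cast h), if_pos h]
  · rw [if_neg (by exact_mod_cast h), if_neg h]

theorem altGet_step (ap : List (List Int)) (m n : Int) (F : List (List Int)) (r c : Nat)
    (hr : (r : Int) < m) (hc : (c : Int) < n) :
    altGet (altStep ap m n F) (r : Int) (c : Int)
      = PySem.Int.mod
        (((PySem.List.pyRange ((r:Int)+1) m).foldl (fun s i =>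
            if altGet ap i (c:Int) < altGet ap (r:Int) (c:Int) then s + altGet F i (c:Int) else s) 0)
         + ((PySem.List.pyRange ((c:Int)+1) n).foldl (fun s j =>
            if altGet ap (r:Int) j < altGet ap (r:Int) (c:Int) then s + altGet F (r:Int) j else s) 0))
        1000000007 := by
  rw [altGet, altStep,
    PySem.List.pyGetD_map_pyRange_of_nonneg _ m _ _ (by positivity) hr,
    PySem.List.pyGetD_map_pyRange_of_nonneg _ n _ _ (by positivity) hc]

theorem foldl_const_iterate {α β : Type} (l : List α) (g : β → β) (x : β) :
    l.foldl (fun y _ => g y) x = g^[l.length] x := by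
  induction l generalizing x with
  | nil => rfl
  | cons a t ih => simp [List.foldl_cons, ih, Function.iterate_succ_apply]

theorem foldl_ite_add_shift {α : Type} (l : List α) (p : α → Prop) [DecidablePred p]
    (g : α → Int) (a : Int) :
    l.foldl (fun s x => if p x then s + g x else s) a
      = a + l.foldl (fun s x => if p x then s + g x else s) 0 := by
  rw [PySem.List.foldl_ite_eq_foldl_filter, PySem.List.foldl_ite_eq_foldl_filter,
    PySem.List.foldl_add, PySem.List.foldl_add]
  ring

theorem dp_nonpos (fuel : Nat) : ∀ (arr : List (List Int)) (m n r c k cnt : Int),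
    k ≤ 0 → waysDp arr m n fuel r c k cnt = 0 := by
  induction fuel with
  | zero => intro arr m n r c k cnt _; rfl
  | succ fuel ih =>
    intro arr m n r c k cnt hk
    rw [waysDp, if_neg (by omega)]
    have h1 : (PySem.List.pyRange 0 m).foldl (fun ans i =>
          if i ≤ r then ans
          else if 0 < arrGet arr i c ∧ arrGet arr i c < cnt then
            ans + waysDp arr m n fuel i c (k-1) (arrGet arr i c)
          else ans) 0 = 0 := by
      rw [PySem.List.foldl_congr_mem _ _ (fun (ans : Int) (_ : Int) => ans) 0 ?_,
        PySem.List.foldl_ignore]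
      intro acc x _
      rw [ih arr m n x c (k-1) (arrGet arr x c) (by omega)]
      split <;> [skip; split] <;> simp
    rw [h1]
    have h2 : (PySem.List.pyRange 0 n).foldl (fun ans j =>
          if j ≤ c then ans
          else if 0 < arrGet arr r j ∧ arrGet arr r j < cnt then
            ans + waysDp arr m n fuel r j (k-1) (arrGet arr r j)
          else ans) 0 = 0 := by
      rw [PySem.List.foldl_congr_mem _ _ (fun (ans : Int) (_ : Int) => ans) 0 ?_,
        PySem.List.foldl_ignore]
      intro acc x _
      rw [ih arr m n r x (k-1) (arrGet arr r x) (by omega)]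
      split <;> [skip; split] <;> simp
    rw [h2, mod0]

theorem dp_gt (K : Nat) : ∀ (fuel : Nat) (arr : List (List Int)) (m n r c cnt : Int),
    cnt < (K : Int) + 2 → waysDp arr m n fuel r c ((K : Int) + 2) cnt = 0 := by
  induction K with
  | zero =>
    intro fuel arr m n r c cnt hcnt
    cases fuel with
    | zero => rfl
    | succ fuel =>
      rw [waysDp, if_neg (by omega)]
      have h1 : (PySem.List.pyRange 0 m).foldl (fun ans i =>
            if i ≤ r then ans
            else if 0 < arrGet arr i c ∧ arrGet arr i c < cnt then
              ans + waysDp arr m n fuel i c (((0:Nat) : Int) + 2 - 1) (arrGet arr i c)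
            else ans) 0 = 0 := by
        rw [PySem.List.foldl_congr_mem _ _ (fun (ans : Int) (_ : Int) => ans) 0 ?_,
          PySem.List.foldl_ignore]
        intro acc x _
        split
        · rfl
        · rw [if_neg (by omega)]
      rw [h1]
      have h2 : (PySem.List.pyRange 0 n).foldl (fun ans j =>
            if j ≤ c then ans
            else if 0 < arrGet arr r j ∧ arrGet arr r j < cnt then
              ans + waysDp arr m n fuel r j (((0:Nat) : Int) + 2 - 1) (arrGet arr r j)
            else ans) 0 = 0 := by
        rw [PySem.List.foldl_congr_mem _ _ (fun (ans : Int) (_ : Int) => ans) 0 ?_,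
          PySem.List.foldl_ignore]
        intro acc x _
        split
        · rfl
        · rw [if_neg (by omega)]
      rw [h2, mod0]
  | succ K ih =>
    intro fuel arr m n r c cnt hcnt
    cases fuel with
    | zero => rfl
    | succ fuel =>
      rw [waysDp, if_neg (by push_cast; omega)]
      have hterm : ∀ (R C x : Int), 0 < arrGet arr R C → arrGet arr R C < cnt →
          waysDp arr m n fuel R C (((K+1:Nat) : Int) + 2 - 1) (arrGet arr R C) = 0 := by
        intro R C x h1 h2
        have : (((K+1:Nat) : Int) + 2 - 1) = ((K : Int) + 2) := by push_cast; ring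
        rw [this]
        exact ih fuel arr m n R C (arrGet arr R C) (by push_cast at hcnt ⊢; omega)
      have h1 : (PySem.List.pyRange 0 m).foldl (fun ans i =>
            if i ≤ r then ans
            else if 0 < arrGet arr i c ∧ arrGet arr i c < cnt then
              ans + waysDp arr m n fuel i c (((K+1:Nat) : Int) + 2 - 1) (arrGet arr i c)
            else ans) 0 = 0 := by
        rw [PySem.List.foldl_congr_mem _ _ (fun (ans : Int) (_ : Int) => ans) 0 ?_,
          PySem.List.foldl_ignore]
        intro acc x _
        split
        · rfl
        · split
          · rename_i hcond; rw [hterm x c 0 hcond.1 hcond.2]; ring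
          · rfl
      rw [h1]
      have h2 : (PySem.List.pyRange 0 n).foldl (fun ans j =>
            if j ≤ c then ans
            else if 0 < arrGet arr r j ∧ arrGet arr r j < cnt then
              ans + waysDp arr m n fuel r j (((K+1:Nat) : Int) + 2 - 1) (arrGet arr r j)
            else ans) 0 = 0 := by
        rw [PySem.List.foldl_congr_mem _ _ (fun (ans : Int) (_ : Int) => ans) 0 ?_,
          PySem.List.foldl_ignore]
        intro acc x _
        split
        · rfl
        · split
          · rename_i hcond; rw [hterm r x 0 hcond.1 hcond.2]; ring
          · rfl
      rw [h2, mod0]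

theorem alt_zero (pizza : List String) (n : Nat) (t r c : Nat)
    (hr : r < pizza.length) (hc : c < n) (h0 : apN pizza r c = 0) :
    altGet ((altStep (applesOf n pizza) (pizza.length : Int) (n : Int))^[t]
      (altF0 pizza n)) (r : Int) (c : Int) = 0 := by
  have hrc : altGet (applesOf n pizza) (r : Int) (c : Int) = 0 := by
    rw [altGet_applesOf n pizza r c (by omega) hc, h0]; rfl
  cases t with
  | zero => rw [Function.iterate_zero_apply, altGet_f0 pizza n r c hr hc, if_neg (by omega)]
  | succ t =>
    rw [Function.iterate_succ_apply',
      altGet_step _ _ _ _ r c (by exact_mod_cast hr) (by exact_mod_cast hc)]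
    have h1 : (PySem.List.pyRange ((r:Int)+1) (pizza.length : Int)).foldl (fun s i =>
          if altGet (applesOf n pizza) i (c:Int) < altGet (applesOf n pizza) (r:Int) (c:Int)
          then s + altGet ((altStep (applesOf n pizza) (pizza.length : Int) (n : Int))^[t] (altF0 pizza n)) i (c:Int) else s) 0 = 0 := by
      rw [PySem.List.foldl_congr_mem _ _ (fun (s : Int) (_ : Int) => s) 0 ?_,
        PySem.List.foldl_ignore]
      intro acc x hx
      obtain ⟨hx1, hx2⟩ := PySem.List.mem_pyRange_one.mp hx
      have hxe : x = ((x.toNat : Nat) : Int) := by omega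
      rw [hrc, hxe, altGet_applesOf n pizza x.toNat c (by omega) hc]
      rw [if_neg (not_lt.mpr (by positivity))]
    rw [h1]
    have h2 : (PySem.List.pyRange ((c:Int)+1) (n : Int)).foldl (fun s j =>
          if altGet (applesOf n pizza) (r:Int) j < altGet (applesOf n pizza) (r:Int) (c:Int)
          then s + altGet ((altStep (applesOf n pizza) (pizza.length : Int) (n : Int))^[t] (altF0 pizza n)) (r:Int) j else s) 0 = 0 := by
      rw [PySem.List.foldl_congr_mem _ _ (fun (s : Int) (_ : Int) => s) 0 ?_,
        PySem.List.foldl_ignore]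
      intro acc x hx
      obtain ⟨hx1, hx2⟩ := PySem.List.mem_pyRange_one.mp hx
      have hxe : x = ((x.toNat : Nat) : Int) := by omega
      rw [hrc, hxe, altGet_applesOf n pizza r x.toNat (by omega) (by omega)]
      rw [if_neg (not_lt.mpr (by positivity))]
    rw [h2]
    norm_num [mod0]

theorem main_dp (pizza : List String) (n : Nat) (t : Nat) :
    ∀ (fuel : Nat) (r c : Nat), r < pizza.length → c < n →
    apN pizza r c < fuel → (t = 0 → 0 < apN pizza r c) →
    waysDp (waysArr pizza (pizza.length : Int) (n : Int)) (pizza.length : Int) (n : Int)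
      fuel (r : Int) (c : Int) ((t : Int) + 1) ((apN pizza r c : Nat) : Int)
      = altGet ((altStep (applesOf n pizza) (pizza.length : Int) (n : Int))^[t]
          (altF0 pizza n)) (r : Int) (c : Int) := by
  induction t with
  | zero =>
    intro fuel r c hr hc hfuel ht0
    cases fuel with
    | zero => omega
    | succ fuel =>
      rw [waysDp, if_pos (by norm_num), Function.iterate_zero_apply,
        altGet_f0 pizza n r c hr hc, if_pos (ht0 rfl)]
  | succ t ih =>
    intro fuel r c hr hc hfuel ht0
    cases fuel with
    | zero => omega
    | succ fuel =>
      rw [waysDp, if_neg (by push_cast; omega), Function.iterate_succ_apply',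
        altGet_step _ _ _ _ r c (by exact_mod_cast hr) (by exact_mod_cast hc)]
      rw [PySem.List.pyRange_one_append 0 ((r:Int)+1) (pizza.length : Int)
        (by positivity) (by exact_mod_cast hr), List.foldl_append]
      rw [PySem.List.foldl_congr_mem (PySem.List.pyRange 0 ((r:Int)+1)) _
        (fun (a : Int) (_ : Int) => a) 0 ?pre1, PySem.List.foldl_ignore]
      case pre1 =>
        intro acc x hx
        obtain ⟨hx1, hx2⟩ := PySem.List.mem_pyRange_one.mp hx
        rw [if_pos (by omega)]
      rw [PySem.List.foldl_congr_mem (PySem.List.pyRange ((r:Int)+1) (pizza.length : Int)) _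
        (fun (s i : Int) =>
          if altGet (applesOf n pizza) i (c:Int) < altGet (applesOf n pizza) (r:Int) (c:Int)
          then s + altGet ((altStep (applesOf n pizza) (pizza.length : Int) (n : Int))^[t]
            (altF0 pizza n)) i (c:Int) else s) 0 ?row]
      case row =>
        intro acc x hx
        beta_reduce
        obtain ⟨hx1, hx2⟩ := PySem.List.mem_pyRange_one.mp hx
        have hxe : x = ((x.toNat : Nat) : Int) := by omega
        have harr : arrGet (waysArr pizza (pizza.length : Int) (n : Int)) x (c:Int)
            = ((apN pizza x.toNat c : Nat) : Int) := by
          rw [hxe]; exact arrGet_eq pizza _ _ x.toNat c (by omega) (by exact_mod_cast hc)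
        have hap : altGet (applesOf n pizza) x (c:Int) = ((apN pizza x.toNat c : Nat) : Int) := by
          rw [hxe]; exact altGet_applesOf n pizza x.toNat c (by omega) hc
        have haprc : altGet (applesOf n pizza) (r:Int) (c:Int) = ((apN pizza r c : Nat) : Int) :=
          altGet_applesOf n pizza r c (by omega) hc
        rw [if_neg (by omega), harr, hap, haprc]
        by_cases h0 : apN pizza x.toNat c = 0
        · rw [if_neg (by simp [h0]), hxe, alt_zero pizza n t x.toNat c (by omega) hc h0]
          split <;> ring
        · by_cases hlt : apN pizza x.toNat c < apN pizza r c
          · rw [if_pos ⟨by exact_mod_cast Nat.pos_of_ne_zero h0, by exact_mod_cast hlt⟩,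
              if_pos (by exact_mod_cast hlt)]
            have hk : ((((t+1 : Nat) : Int) + 1) - 1) = ((t : Int) + 1) := by push_cast; ring
            rw [hk, hxe]
            simp only [Int.toNat_natCast]
            rw [ih fuel x.toNat c (by omega) hc (by omega)
              (fun h => Nat.pos_of_ne_zero h0)]
          · rw [if_neg (by push_cast; omega), if_neg (by push_cast; omega)]
      rw [PySem.List.pyRange_one_append 0 ((c:Int)+1) (n : Int)
        (by positivity) (by exact_mod_cast hc), List.foldl_append]
      rw [PySem.List.foldl_congr_mem (PySem.List.pyRange 0 ((c:Int)+1)) _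
        (fun (a : Int) (_ : Int) => a) _ ?pre2, PySem.List.foldl_ignore]
      case pre2 =>
        intro acc x hx
        obtain ⟨hx1, hx2⟩ := PySem.List.mem_pyRange_one.mp hx
        rw [if_pos (by omega)]
      rw [PySem.List.foldl_congr_mem (PySem.List.pyRange ((c:Int)+1) (n : Int)) _
        (fun (s j : Int) =>
          if altGet (applesOf n pizza) (r:Int) j < altGet (applesOf n pizza) (r:Int) (c:Int)
          then s + altGet ((altStep (applesOf n pizza) (pizza.length : Int) (n : Int))^[t]
            (altF0 pizza n)) (r:Int) j else s) _ ?col]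
      case col =>
        intro acc x hx
        beta_reduce
        obtain ⟨hx1, hx2⟩ := PySem.List.mem_pyRange_one.mp hx
        have hxe : x = ((x.toNat : Nat) : Int) := by omega
        have harr : arrGet (waysArr pizza (pizza.length : Int) (n : Int)) (r:Int) x
            = ((apN pizza r x.toNat : Nat) : Int) := by
          rw [hxe]; exact arrGet_eq pizza _ _ r x.toNat (by exact_mod_cast hr) (by omega)
        have hap : altGet (applesOf n pizza) (r:Int) x = ((apN pizza r x.toNat : Nat) : Int) := by
          rw [hxe]; exact altGet_applesOf n pizza r x.toNat (by omega) (by omega)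
        have haprc : altGet (applesOf n pizza) (r:Int) (c:Int) = ((apN pizza r c : Nat) : Int) :=
          altGet_applesOf n pizza r c (by omega) hc
        rw [if_neg (by omega), harr, hap, haprc]
        by_cases h0 : apN pizza r x.toNat = 0
        · rw [if_neg (by simp [h0]), hxe, alt_zero pizza n t r x.toNat hr (by omega) h0]
          split <;> ring
        · by_cases hlt : apN pizza r x.toNat < apN pizza r c
          · rw [if_pos ⟨by exact_mod_cast Nat.pos_of_ne_zero h0, by exact_mod_cast hlt⟩,
              if_pos (by exact_mod_cast hlt)]
            have hk : ((((t+1 : Nat) : Int) + 1) - 1) = ((t : Int) + 1) := by push_cast; ring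
            rw [hk, hxe]
            simp only [Int.toNat_natCast]
            rw [ih fuel r x.toNat (by omega) (by omega) (by omega)
              (fun h => Nat.pos_of_ne_zero h0)]
          · rw [if_neg (by push_cast; omega), if_neg (by push_cast; omega)]
      conv_lhs => rw [foldl_ite_add_shift]

theorem apN_zero_iff (pizza : List String) :
    apN pizza 0 0 = 0 ↔ ∀ s ∈ pizza, 'A' ∉ s.toList := by
  simp [apN, List.sum_eq_zero_iff, List.count_eq_zero]

theorem ways_eq (pizza : List String) (k : Int)
    (hne : pizza ≠ []) (hrow : (pizza.headD "").toList ≠ [])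
    (hnd : ¬ (k = 1 ∧ ∀ s ∈ pizza, 'A' ∉ s.toList)) :
    ways pizza k = ways_alt pizza k := by
  have hm : 0 < pizza.length := List.length_pos_iff.mpr hne
  have hn : 0 < (pizza.headD "").toList.length := List.length_pos_iff.mpr hrow
  have hnI : PySem.Str.len (PySem.List.pyGetD pizza 0 "") = ((pizza.headD "").toList.length : Int) := by
    rw [PySem.List.pyGetD_zero, PySem.Str.len_eq]
    cases pizza with
    | nil => exact absurd rfl hne
    | cons a l => rfl
  have harr00 : arrGet (waysArr pizza (pizza.length : Int) ((pizza.headD "").toList.length : Int)) 0 0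
      = ((apN pizza 0 0 : Nat) : Int) := by
    have := arrGet_eq pizza (pizza.length : Int) ((pizza.headD "").toList.length : Int) 0 0
      (by exact_mod_cast hm) (by exact_mod_cast hn)
    simpa using this
  have htot : altGet (applesOf (pizza.headD "").toList.length pizza) 0 0
      = ((apN pizza 0 0 : Nat) : Int) := by
    have := altGet_applesOf (pizza.headD "").toList.length pizza 0 0 (by omega) hn
    simpa using this
  simp only [ways, ways_alt, hnI, Int.toNat_natCast, altRev_reverse, harr00, htot]
  rcases lt_or_ge k 1 with hk | hk
  · rw [if_pos (Or.inl hk)]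
    exact dp_nonpos _ _ _ _ _ _ _ _ (by omega)
  · by_cases hk2 : ((apN pizza 0 0 : Nat) : Int) < k
    · rw [if_pos (Or.inr hk2)]
      rcases (by omega : k = 1 ∨ 2 ≤ k) with hk1 | hk3
      · exfalso
        apply hnd
        refine ⟨hk1, (apN_zero_iff pizza).mp ?_⟩
        omega
      · rw [show k = (((k-2).toNat : Nat) : Int) + 2 by omega]
        exact dp_gt _ _ _ _ _ _ _ _ (by omega)
    · rw [if_neg (by omega)]
      rw [foldl_const_iterate, PySem.List.length_pyRange_one]
      have hsz : (k - 1 - 0).toNat = (k-1).toNat := by omega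
      rw [hsz]
      have := main_dp pizza (pizza.headD "").toList.length (k-1).toNat
        (apN pizza 0 0 + 1) 0 0 hm hn (by omega) (by omega)
      rw [show k = (((k-1).toNat : Nat) : Int) + 1 by omega]
      simpa [altF0] using this

theorem ways_tight_eq (pizza : List String) (k : Int)
    (hne : pizza ≠ []) (hrow : (pizza.headD "").toList ≠ [])
    (hk1 : k = 1) (hA : ∀ s ∈ pizza, 'A' ∉ s.toList) :
    ways pizza k = 1 ∧ ways_alt pizza k = 0 := by
  subst hk1
  have hm : 0 < pizza.length := List.length_pos_iff.mpr hne
  have hn : 0 < (pizza.headD "").toList.length := List.length_pos_iff.mpr hrow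
  have hnI : PySem.Str.len (PySem.List.pyGetD pizza 0 "") = ((pizza.headD "").toList.length : Int) := by
    rw [PySem.List.pyGetD_zero, PySem.Str.len_eq]
    cases pizza with
    | nil => exact absurd rfl hne
    | cons a l => rfl
  have hap0 : apN pizza 0 0 = 0 := (apN_zero_iff pizza).mpr hA
  have harr00 : arrGet (waysArr pizza (pizza.length : Int) ((pizza.headD "").toList.length : Int)) 0 0
      = (0 : Int) := by
    have := arrGet_eq pizza (pizza.length : Int) ((pizza.headD "").toList.length : Int) 0 0
      (by exact_mod_cast hm) (by exact_mod_cast hn)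
    simpa [hap0] using this
  have htot : altGet (applesOf (pizza.headD "").toList.length pizza) 0 0 = (0 : Int) := by
    have := altGet_applesOf (pizza.headD "").toList.length pizza 0 0 (by omega) hn
    simpa [hap0] using this
  constructor
  · simp only [ways, hnI, harr00, Int.toNat_zero]
    rw [waysDp, if_pos rfl]
  · simp only [ways_alt, hnI, Int.toNat_natCast, altRev_reverse, htot]
    rw [if_pos (Or.inr (by norm_num))]

-- ===== VERDICT (by name: the statement is the Claim_ definition above) =====
theorem ways_spec : Claim_unchanged_ways := by
  intro pizza k _ hpre
  unfold Pre_ways at hpre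
  unfold Spec_ways
  intro hnd
  unfold D_ways at hnd
  exact ways_eq pizza k hpre.1 hpre.2 hnd

theorem ways_changed : Claim_changed_ways := by unfold Claim_changed_ways; decide

theorem ways_tight : Claim_exact_ways := by
  intro pizza k _ hpre hD
  unfold Pre_ways at hpre
  unfold D_ways at hD
  have h := ways_tight_eq pizza k hpre.1 hpre.2 hD.1 hD.2
  rw [h.1, h.2]
  norm_num
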